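-- pv_equiv track=rewrite | github.com/okendresen/cupster | betting/tournament.py | format_match_text
-- ===== SOURCE A (Python) =====
-- def format_match_text(match1, match2, default):
--     mt = '  {0} vs {1} '.format(match1, match2)
--     l = len(mt)
--     while l < 32:
--         mt += '\t'
--         l += 8
--     mt += '[{}] '.format(default)
--     return mt
-- ===== SOURCE B (Python) =====
-- def format_match_text(match1, match2, default):
--     base = '  {0} vs {1} '.format(match1, match2)
--     tabs = max(0, (32 - len(base) + 7) // 8)
--     return base + '\t' * tabs + '[{}] '.format(default)
-- ===== Notes on version B (the rewrite author's own statement) =====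
-- stated objective: simpler
-- what changed: The tab-padding while-loop (append one tab, bump a counter by 8) is replaced by a closed-form ceiling-division count of tabs and a single string-repetition, with no loop.
import Mathlib
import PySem

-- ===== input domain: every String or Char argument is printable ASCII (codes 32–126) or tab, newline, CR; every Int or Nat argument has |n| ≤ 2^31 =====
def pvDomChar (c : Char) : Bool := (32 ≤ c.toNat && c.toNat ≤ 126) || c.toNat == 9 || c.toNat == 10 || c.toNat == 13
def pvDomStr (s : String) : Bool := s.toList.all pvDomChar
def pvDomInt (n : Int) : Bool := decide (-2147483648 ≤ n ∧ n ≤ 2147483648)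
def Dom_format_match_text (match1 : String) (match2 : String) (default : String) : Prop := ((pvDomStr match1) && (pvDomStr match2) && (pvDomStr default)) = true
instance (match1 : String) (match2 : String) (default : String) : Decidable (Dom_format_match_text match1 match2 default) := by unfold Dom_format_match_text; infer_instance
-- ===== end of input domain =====

-- B replaces A's tab-padding while-loop by a closed-form ceiling-division tab count (objective: simpler).

-- ===== PORT A =====
-- the while-loop: while l < 32: mt += '\t'; l += 8
def fmtPadLoop (mt : String) (l : Int) : String :=
  if l < 32 then fmtPadLoop (mt ++ "\t") (l + 8) else mt
termination_by (32 - l).toNat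
decreasing_by omega

def format_match_text (match1 : String) (match2 : String) (default : String) : String :=
  let mt := "  " ++ match1 ++ " vs " ++ match2 ++ " "
  fmtPadLoop mt (PySem.Str.len mt) ++ ("[" ++ default ++ "] ")

-- ===== PORT B =====
def format_match_text_alt (match1 : String) (match2 : String) (default : String) : String :=
  let base := "  " ++ match1 ++ " vs " ++ match2 ++ " "
  let tabs := max 0 (PySem.Int.floordiv (32 - PySem.Str.len base + 7) 8)
  -- '\t' * tabs : string repetition ported by hand (exact: n copies of the tab character)
  base ++ String.ofList (List.replicate tabs.toNat '\t') ++ ("[" ++ default ++ "] ")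

-- ===== PRECONDITION & SPEC =====
def Spec_format_match_text (match1 : String) (match2 : String) (default : String) (out : String) : Prop := out = format_match_text_alt match1 match2 default
instance (match1 : String) (match2 : String) (default : String) (out : String) : Decidable (Spec_format_match_text match1 match2 default out) := by unfold Spec_format_match_text; infer_instance

-- ===== CLAIM (what is proved, stated in full; the proofs are below) =====
def Claim_equal_format_match_text : Prop := ∀ (match1 : String) (match2 : String) (default : String), Dom_format_match_text match1 match2 default → Spec_format_match_text match1 match2 default (format_match_text match1 match2 default)

-- ===== LEMMAS AND PROOFS =====

-- the loop appends exactly max 0 ⌈(32 - l)/8⌉ tabs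
theorem fmtPadLoop_eq (n : Nat) : ∀ (l : Int) (mt : String), (32 - l).toNat = n →
    fmtPadLoop mt l = mt ++ String.ofList (List.replicate (max 0 (PySem.Int.floordiv (32 - l + 7) 8)).toNat '\t') := by
  induction n using Nat.strong_induction_on with
  | _ n ih =>
    intro l mt hn
    rw [fmtPadLoop]
    split
    · rename_i hl
      rw [ih (32 - (l + 8)).toNat (by omega) (l + 8) (mt ++ "\t") rfl]
      rw [PySem.Int.floordiv_eq_ediv_of_pos (by norm_num), PySem.Int.floordiv_eq_ediv_of_pos (by norm_num)]
      have hcount : (max 0 (32 - l + 7) / 8).toNat = (max 0 (32 - (l + 8) + 7) / 8).toNat + 1 := by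
        omega
      have h8 : (max 0 ((32 - l + 7) / 8)).toNat = (max 0 (32 - l + 7) / 8).toNat := by omega
      have h8' : (max 0 ((32 - (l + 8) + 7) / 8)).toNat = (max 0 (32 - (l + 8) + 7) / 8).toNat := by omega
      rw [h8, h8', hcount]
      apply String.toList_inj.mp
      simp [List.replicate_succ, String.toList_ofList]
    · rename_i hl
      have : (max 0 (PySem.Int.floordiv (32 - l + 7) 8)).toNat = 0 := by
        rw [PySem.Int.floordiv_eq_ediv_of_pos (by norm_num)]
        omega
      rw [this]
      apply String.toList_inj.mp
      simp

-- ===== VERDICT (by name: the statement is the Claim_ definition above) =====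
theorem format_match_text_spec : Claim_equal_format_match_text := by
  intro match1 match2 default _
  unfold Spec_format_match_text format_match_text format_match_text_alt
  show fmtPadLoop ("  " ++ match1 ++ " vs " ++ match2 ++ " ") (PySem.Str.len ("  " ++ match1 ++ " vs " ++ match2 ++ " ")) ++ ("[" ++ default ++ "] ")
      = ("  " ++ match1 ++ " vs " ++ match2 ++ " ")
        ++ String.ofList (List.replicate (max 0 (PySem.Int.floordiv (32 - PySem.Str.len ("  " ++ match1 ++ " vs " ++ match2 ++ " ") + 7) 8)).toNat '\t')
        ++ ("[" ++ default ++ "] ")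
  rw [fmtPadLoop_eq (32 - PySem.Str.len ("  " ++ match1 ++ " vs " ++ match2 ++ " ")).toNat _ _ rfl]
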